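-- pv_equiv track=rewrite | github.com/devch96/cote | pro/lv0/ranking.py | solution
-- ===== SOURCE A (Python) =====
-- def solution(score):
--     score = [sum(i) for i in score]
--     dic = dict()
--     for i, j in enumerate(sorted(score, reverse=True)):
--         if j not in dic:
--             dic[j] = i+1
--
--     answer = [dic[i] for i in score]
--     return answer
-- ===== SOURCE B (Python) =====
-- def solution(score):
--     sums = [sum(sub) for sub in score]
--     return [1 + sum(1 for w in sums if w > v) for v in sums]
-- ===== Notes on version B (the rewrite author's own statement) =====
-- stated objective: simpler
-- what changed: Replaces the sort + enumerate + first-occurrence dict with a direct count of strictly greater sums (rank = 1 + #greater), removing the sort and the dict entirely.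
import Mathlib
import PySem

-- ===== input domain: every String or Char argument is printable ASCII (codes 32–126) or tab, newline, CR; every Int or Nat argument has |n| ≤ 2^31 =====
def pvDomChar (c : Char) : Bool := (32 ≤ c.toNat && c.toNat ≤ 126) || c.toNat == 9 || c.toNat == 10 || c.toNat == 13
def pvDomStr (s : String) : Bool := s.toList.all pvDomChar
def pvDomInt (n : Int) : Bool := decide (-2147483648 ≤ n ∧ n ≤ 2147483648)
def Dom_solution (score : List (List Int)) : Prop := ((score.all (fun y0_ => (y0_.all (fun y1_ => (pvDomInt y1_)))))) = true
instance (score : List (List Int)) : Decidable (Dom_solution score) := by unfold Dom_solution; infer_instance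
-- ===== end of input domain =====

-- B replaces A's sort + first-occurrence dict by directly counting strictly greater sums; objective: simpler.

-- ===== PORT A =====
-- dic[i] is ported as getD _ 0: every element of score' occurs in the sorted copy, so the key is always present (KeyError never fires).
def solution (score : List (List Int)) : List Int :=
  let score' := score.map (fun i => i.sum)
  let dic := (PySem.List.enumerate (PySem.List.sorted score' (fun x => x) true) 0).foldl
      (fun d p => if d.contains p.2 then d else d.insert p.2 (p.1 + 1)) PySem.Dict.empty
  score'.map (fun i => dic.getD i 0)

-- ===== PORT B =====
def solution_alt (score : List (List Int)) : List Int :=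
  let sums := score.map (fun sub => sub.sum)
  sums.map (fun v => 1 + (sums.countP (fun w => v < w) : Int))

-- ===== PRECONDITION & SPEC =====
def Spec_solution (score : List (List Int)) (out : List Int) : Prop := out = solution_alt score
instance (score : List (List Int)) (out : List Int) : Decidable (Spec_solution score out) := by unfold Spec_solution; infer_instance

-- ===== CLAIM (what is proved, stated in full; the proofs are below) =====
def Claim_equal_solution : Prop := ∀ (score : List (List Int)), Dom_solution score → Spec_solution score (solution score)

-- ===== LEMMAS AND PROOFS =====

-- A's loop body
def pvStep (d : PySem.Dict Int Int) (p : Int × Int) : PySem.Dict Int Int :=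
  if d.contains p.2 then d else d.insert p.2 (p.1 + 1)

-- keys already present are never overwritten by A's insert-if-absent loop
theorem pv_loop_stable (l : List Int) (s : Int) (d : PySem.Dict Int Int) (v : Int)
    (hv : d.contains v = true) :
    ((PySem.List.enumerate l s).foldl pvStep d).get? v = d.get? v := by
  induction l generalizing s d with
  | nil => simp [PySem.List.enumerate_nil]
  | cons a t ih =>
    rw [PySem.List.enumerate_cons, List.foldl_cons]
    by_cases ha : d.contains a = true
    · rw [show pvStep d (s, a) = d by simp [pvStep, ha]]
      exact ih (s+1) d hv
    · have hne : a ≠ v := by intro h; rw [h] at ha; exact ha hv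
      have hd' : pvStep d (s, a) = d.insert a (s + 1) := by
        simp [pvStep, (Bool.not_eq_true _).mp ha]
      rw [hd', ih (s+1) _ (by simp [PySem.Dict.contains_insert, hv]),
        PySem.Dict.get?_insert]
      simp [Ne.symm hne]

-- on a descending list, a fresh key v gets value s + 1 + (#strictly greater elements)
theorem pv_loop_fresh (l : List Int) (s : Int) (d : PySem.Dict Int Int) (v : Int)
    (hp : l.Pairwise (fun a b => b ≤ a)) (hv : v ∈ l) (hd : d.contains v = false) :
    ((PySem.List.enumerate l s).foldl pvStep d).get? v
      = some (s + 1 + (l.countP (fun w => decide (v < w)) : Int)) := by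
  induction l generalizing s d with
  | nil => cases hv
  | cons a t ih =>
    rw [PySem.List.enumerate_cons, List.foldl_cons]
    obtain ⟨hat, hp'⟩ := List.pairwise_cons.mp hp
    by_cases hva : v = a
    · subst hva
      have hd' : pvStep d (s, v) = d.insert v (s + 1) := by simp [pvStep, hd]
      rw [hd', pv_loop_stable t (s+1) _ v (by simp),
        PySem.Dict.get?_insert_self]
      have hc : t.countP (fun w => decide (v < w)) = 0 := by
        rw [List.countP_eq_zero]
        intro w hw
        simpa using not_lt.mpr (hat w hw)
      simp [hc]
    · have hvt : v ∈ t := (List.mem_cons.mp hv).resolve_left hva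
      have hvlt : v < a := lt_of_le_of_ne (hat v hvt) hva
      have hcnt : ((a :: t).countP (fun w => decide (v < w)) : Int)
          = 1 + (t.countP (fun w => decide (v < w)) : Int) := by
        rw [List.countP_cons]
        simp [hvlt]; ring
      by_cases ha : d.contains a = true
      · rw [show pvStep d (s, a) = d by simp [pvStep, ha]]
        rw [ih (s+1) d hp' hvt hd, hcnt]
        congr 1; ring
      · have hd' : pvStep d (s, a) = d.insert a (s + 1) := by
          simp [pvStep, (Bool.not_eq_true _).mp ha]
        rw [hd', ih (s+1) _ hp' hvt
          (by simp [PySem.Dict.contains_insert, hd, show (v == a) = false by simp [hva]]),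
          hcnt]
        congr 1; ring

-- pointwise value of A's answer list
theorem pv_getD (sums : List Int) (v : Int) (hv : v ∈ sums) :
    ((PySem.List.enumerate (PySem.List.sorted sums (fun x => x) true) 0).foldl pvStep
        PySem.Dict.empty).getD v 0
      = 1 + (sums.countP (fun w => decide (v < w)) : Int) := by
  have hperm := PySem.List.sorted_perm sums (fun x => x) true
  have hget := pv_loop_fresh (PySem.List.sorted sums (fun x => x) true) 0 PySem.Dict.empty v
    (PySem.List.sorted_pairwise_rev sums (fun x => x)) ((PySem.List.mem_sorted _ _ _ _).mpr hv)
    (PySem.Dict.contains_empty v)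
  rw [PySem.Dict.getD_eq_get?_getD, hget, hperm.countP_eq]
  simp
-- ===== VERDICT (by name: the statement is the Claim_ definition above) =====
theorem solution_spec : Claim_equal_solution := by
  intro score _
  unfold Spec_solution solution solution_alt
  apply List.map_congr_left
  intro v hv
  exact pv_getD (score.map (fun i => i.sum)) v hv
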